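-- pv_equiv track=rewrite | github.com/qqgeogor/kaggle-quora-solution-8th | model_hhy/utils/pos_utils.py | pos_fre_min_same
-- ===== SOURCE A (Python) =====
-- def pos_fre_min_same(pos_1,pos_2):
--     c_p_1 = {}
--     c_p_2 = {}
--     for i in pos_1:
--         if i in c_p_1:
--             c_p_1[i]= c_p_1[i]+1
--         else:
--             c_p_1.setdefault(i,0)
--     for i in pos_2:
--         if i in c_p_2:
--             c_p_2[i]= c_p_2[i]+1
--         else:
--             c_p_2.setdefault(i,0)
--     c_p_1 = list(sorted(c_p_1.items(),key=lambda x:x[1]))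
--     c_p_2 = list(sorted(c_p_2.items(), key=lambda x:x[1]))
--     return c_p_1[0]==c_p_2[0]
-- ===== SOURCE B (Python) =====
-- def pos_fre_min_same(pos_1, pos_2):
--     def min_entry(pos):
--         counts = {}
--         for t in pos:
--             counts[t] = counts.get(t, 0) + 1
--         return min(counts.items(), key=lambda kv: kv[1])
--     t1, c1 = min_entry(pos_1)
--     t2, c2 = min_entry(pos_2)
--     return t1 == t2 and c1 == c2
-- ===== Notes on version B (the rewrite author's own statement) =====
-- stated objective: faster
-- what changed: B replaces A's sort-of-both-count-tables (stable sort by count, then take entry [0]) by a single linear min-scan over each count table, keeping the first-occurrence tie-break, and compares tag and raw count directly instead of the shifted (count-1) values.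
import Mathlib
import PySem

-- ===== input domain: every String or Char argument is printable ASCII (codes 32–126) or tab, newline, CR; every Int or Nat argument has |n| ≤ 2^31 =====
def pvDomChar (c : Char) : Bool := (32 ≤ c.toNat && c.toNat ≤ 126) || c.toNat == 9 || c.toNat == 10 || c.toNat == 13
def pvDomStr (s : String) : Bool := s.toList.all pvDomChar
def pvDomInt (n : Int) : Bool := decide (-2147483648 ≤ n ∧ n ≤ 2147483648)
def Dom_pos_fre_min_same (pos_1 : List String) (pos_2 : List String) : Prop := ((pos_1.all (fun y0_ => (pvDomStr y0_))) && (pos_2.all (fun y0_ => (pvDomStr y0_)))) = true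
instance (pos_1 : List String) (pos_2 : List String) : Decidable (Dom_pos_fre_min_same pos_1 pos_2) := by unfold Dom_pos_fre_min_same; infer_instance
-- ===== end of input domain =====

-- B replaces A's sort-both-count-tables-and-take-the-first-entry by a direct linear min-scan
-- of each count table (first minimal entry = stable sort's first element); objective: faster.

-- ===== PORT A =====
-- A's counting loop: 'if i in d: d[i] = d[i]+1 else: d.setdefault(i, 0)'.
-- 'd[i]' is ported as 'd.getD i 0', exact here because the branch guarantees i ∈ d.
def pvCountA (pos : List String) : PySem.Dict String Int :=
  pos.foldl
    (fun d i => if d.contains i then d.insert i (d.getD i 0 + 1) else d.setdefault i 0)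
    PySem.Dict.empty

def pos_fre_min_same (pos_1 : List String) (pos_2 : List String) : Bool :=
  match PySem.List.pyGet? (PySem.List.sorted (pvCountA pos_1).items (fun x => x.2) false) 0,
        PySem.List.pyGet? (PySem.List.sorted (pvCountA pos_2).items (fun x => x.2) false) 0 with
  | some a, some b => a == b
  | _, _ => false   -- unreachable under Pre_: Python raises IndexError on an empty list

-- ===== PORT B =====
-- Source B: 'counts[t] = counts.get(t, 0) + 1'
def pvCountB (pos : List String) : PySem.Dict String Int :=
  pos.foldl (fun d t => d.insert t (d.getD t 0 + 1)) PySem.Dict.empty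

-- Source B: 'min(counts.items(), key=lambda kv: kv[1])'
def pvMinEntry? (pos : List String) : Option (String × Int) :=
  PySem.List.min? (pvCountB pos).items (fun kv => kv.2)

def pos_fre_min_same_alt (pos_1 : List String) (pos_2 : List String) : Bool :=
  match pvMinEntry? pos_1 with
  | none => false   -- unreachable under Pre_: Python min() raises ValueError on an empty dict
  | some (t1, c1) =>
    match pvMinEntry? pos_2 with
    | none => false
    | some (t2, c2) => t1 == t2 && c1 == c2

-- ===== PRECONDITION & SPEC =====
-- A raises IndexError (c_p_1[0] / c_p_2[0]) exactly when a list is empty; both inputs must be nonempty.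
def Pre_pos_fre_min_same (pos_1 : List String) (pos_2 : List String) : Prop :=
  pos_1 ≠ [] ∧ pos_2 ≠ []
instance (pos_1 : List String) (pos_2 : List String) : Decidable (Pre_pos_fre_min_same pos_1 pos_2) := by unfold Pre_pos_fre_min_same; infer_instance

def pvWitness_pos_fre_min_same : List String × List String := (["NN", "VB", "NN"], ["VB"])

def Spec_pos_fre_min_same (pos_1 : List String) (pos_2 : List String) (out : Bool) : Prop := out = pos_fre_min_same_alt pos_1 pos_2
instance (pos_1 : List String) (pos_2 : List String) (out : Bool) : Decidable (Spec_pos_fre_min_same pos_1 pos_2 out) := by unfold Spec_pos_fre_min_same; infer_instance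

-- ===== CLAIM (what is proved, stated in full; the proofs are below) =====
def Claim_equal_pos_fre_min_same : Prop := ∀ (pos_1 : List String) (pos_2 : List String), Dom_pos_fre_min_same pos_1 pos_2 → Pre_pos_fre_min_same pos_1 pos_2 → Spec_pos_fre_min_same pos_1 pos_2 (pos_fre_min_same pos_1 pos_2)

-- ===== LEMMAS AND PROOFS =====

lemma pv_pyGet?_zero {α : Type} (l : List α) : PySem.List.pyGet? l 0 = l.head? := by
  cases l <;> simp [PySem.List.pyGet?, PySem.List.pyIdx?]

lemma pv_head_insertBy {α : Type} (before : α → α → Bool) (x : α) (acc : List α) :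
    (PySem.List.insertBy before x acc).head? =
      match acc with
      | [] => some x
      | y :: _ => if before x y then some x else some y := by
  cases acc with
  | nil => rfl
  | cons y ys => simp [PySem.List.insertBy]; split_ifs <;> simp

lemma pv_head?_sorted {α : Type} (l : List α) (key : α → Int) :
    (PySem.List.sorted l key false).head? = PySem.List.min? l key := by
  rw [PySem.List.sorted_eq_foldl_insertBy]
  unfold PySem.List.min?
  induction l using List.reverseRecOn with
  | nil => rfl
  | append_singleton l x ih =>
    rw [List.foldl_append, List.foldl_append]
    simp only [List.foldl]
    rw [pv_head_insertBy]
    cases h : List.foldl (fun acc x => PySem.List.insertBy (fun a b => decide (key a < key b)) x acc) [] l with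
    | nil =>
      rw [h] at ih
      simp only [List.head?] at ih
      simp [← ih]
    | cons y ys =>
      rw [h] at ih
      simp only [List.head?] at ih
      simp only [← ih]
      by_cases hk : key x < key y <;> simp [hk]

-- A's table holds each distinct tag, in first-occurrence order, with (count − 1) as value.
lemma pv_itemsA (pos : List String) :
    (pvCountA pos).items =
      (PySem.Set.ofList pos).map (fun k => (k, (pos.count k : Int) - 1)) := by
  unfold pvCountA
  induction pos using List.reverseRecOn with
  | nil => rfl
  | append_singleton l x ih =>
    rw [List.foldl_append]
    simp only [List.foldl]
    set d : PySem.Dict String Int := List.foldl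
      (fun d i => if d.contains i then d.insert i (d.getD i 0 + 1) else d.setdefault i 0)
      PySem.Dict.empty l with hd
    have hkeys : d.keys = PySem.Set.ofList l := by
      show d.items.map Prod.fst = _
      rw [ih, List.map_map]
      exact List.map_id _
    have hnodup : d.keys.Nodup := by rw [hkeys]; exact PySem.Set.nodup_ofList l
    have hofl : PySem.Set.ofList (l ++ [x]) = PySem.Set.add (PySem.Set.ofList l) x := by
      rw [PySem.Set.ofList_eq_foldl, PySem.Set.ofList_eq_foldl, List.foldl_append]
      rfl
    by_cases hx : x ∈ l
    · have hc : d.contains x = true := by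
        rw [PySem.Dict.contains_iff_mem_keys, hkeys, PySem.Set.mem_ofList]; exact hx
      have hmem : (x, (l.count x : Int) - 1) ∈ d.items := by
        rw [ih]
        exact List.mem_map.mpr ⟨x, (PySem.Set.mem_ofList l x).mpr hx, rfl⟩
      have hgetD : d.getD x 0 = (l.count x : Int) - 1 :=
        PySem.Dict.getD_of_mem_items d hmem hnodup 0
      rw [hc]
      simp only [if_true]
      rw [PySem.Dict.items_insert_of_contains d _ hc, ih, List.map_map, hofl]
      have hadd : PySem.Set.add (PySem.Set.ofList l) x = PySem.Set.ofList l := by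
        simp [PySem.Set.add, PySem.Set.contains, hx]
      rw [hadd]
      apply List.map_congr_left
      intro k hk
      simp only [Function.comp]
      by_cases hkx : k = x
      · subst hkx
        simp [hgetD, List.count_append]
      · have : (k == x) = false := by simp [hkx]
        simp [this, List.count_append, List.count_singleton]
        intro h; exact absurd h.symm hkx
    · have hc : d.contains x = false := by
        rw [← Bool.not_eq_true, PySem.Dict.contains_iff_mem_keys, hkeys, PySem.Set.mem_ofList]
        exact hx
      rw [hc]
      simp only [Bool.false_eq_true, if_false]
      rw [PySem.Dict.setdefault_of_not_contains d 0 hc,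
          PySem.Dict.items_insert_of_not_contains d 0 hc, ih, hofl]
      have hadd : PySem.Set.add (PySem.Set.ofList l) x = PySem.Set.ofList l ++ [x] := by
        simp [PySem.Set.add, PySem.Set.contains, hx]
      rw [hadd, List.map_append]
      congr 1
      · apply List.map_congr_left
        intro k hk
        have hkl : k ∈ l := (PySem.Set.mem_ofList l k).mp hk
        have hkx : k ≠ x := fun h => hx (h ▸ hkl)
        simp [List.count_append, List.count_singleton]
        intro h; exact absurd h.symm hkx
      · simp [List.count_append, List.count_eq_zero_of_not_mem hx]

-- B's table is Counter(pos): distinct tags in first-occurrence order with their counts.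
lemma pv_itemsB (pos : List String) :
    (pvCountB pos).items =
      (PySem.Set.ofList pos).map (fun k => (k, (pos.count k : Int))) := by
  unfold pvCountB
  rw [PySem.Dict.foldl_insert_getD_add_one_eq_counter, PySem.Dict.items_counter]

-- shifting every value by −1 does not change which entry the first-min scan picks
def pvMinStep (acc : Option (String × Int)) (x : String × Int) : Option (String × Int) :=
  match acc with
  | none => some x
  | some m => if x.2 < m.2 then some x else some m

lemma pv_min?_eq_foldl (l : List (String × Int)) :
    PySem.List.min? l (fun kv => kv.2) = l.foldl pvMinStep none := by
  unfold PySem.List.min?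
  congr 1
  funext acc x
  cases acc <;> rfl

lemma pv_foldl_minStep_map (l : List (String × Int)) :
    ∀ acc, (l.map (fun p => (p.1, p.2 - 1))).foldl pvMinStep
        (Option.map (fun p : String × Int => (p.1, p.2 - 1)) acc) =
      Option.map (fun p : String × Int => (p.1, p.2 - 1)) (l.foldl pvMinStep acc) := by
  induction l with
  | nil => intro acc; rfl
  | cons p t ih =>
    intro acc
    rw [List.map_cons, List.foldl_cons, List.foldl_cons]
    cases acc with
    | none => exact ih (some p)
    | some m =>
      simp only [Option.map_some, pvMinStep]
      by_cases h : p.2 < m.2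
      · rw [if_pos h, if_pos (show p.2 - 1 < m.2 - 1 by omega)]
        exact ih (some p)
      · rw [if_neg h, if_neg (show ¬(p.2 - 1 < m.2 - 1) by omega)]
        exact ih (some m)

lemma pv_min?_map_sub_one (l : List (String × Int)) :
    PySem.List.min? (l.map (fun p => (p.1, p.2 - 1))) (fun kv => kv.2) =
      Option.map (fun p : String × Int => (p.1, p.2 - 1)) (PySem.List.min? l (fun kv => kv.2)) := by
  rw [pv_min?_eq_foldl, pv_min?_eq_foldl]
  exact pv_foldl_minStep_map l none

-- the entry A ends up comparing is B's min entry with its value shifted by −1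
lemma pv_first_eq_min (pos : List String) :
    PySem.List.pyGet? (PySem.List.sorted (pvCountA pos).items (fun x => x.2) false) 0 =
      Option.map (fun p : String × Int => (p.1, p.2 - 1)) (pvMinEntry? pos) := by
  rw [pv_pyGet?_zero, pv_head?_sorted]
  unfold pvMinEntry?
  rw [pv_itemsA, pv_itemsB]
  have h := pv_min?_map_sub_one ((PySem.Set.ofList pos).map (fun k => (k, (pos.count k : Int))))
  rw [List.map_map] at h
  exact h

lemma pv_minEntry?_isSome (pos : List String) (h : pos ≠ []) :
    ∃ p, pvMinEntry? pos = some p := by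
  cases hm : pvMinEntry? pos with
  | some p => exact ⟨p, rfl⟩
  | none =>
    exfalso
    unfold pvMinEntry? at hm
    rw [PySem.List.min?_eq_none_iff] at hm
    rw [pv_itemsB] at hm
    cases pos with
    | nil => exact h rfl
    | cons a t =>
      have : a ∈ PySem.Set.ofList (a :: t) := (PySem.Set.mem_ofList _ a).mpr (List.mem_cons_self)
      cases hs : PySem.Set.ofList (a :: t) with
      | nil => rw [hs] at this; exact absurd this (List.not_mem_nil)
      | cons b s => rw [hs] at hm; simp at hm

-- ===== VERDICT (by name: the statement is the Claim_ definition above) =====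
theorem pos_fre_min_same_spec : Claim_equal_pos_fre_min_same := by
  intro pos_1 pos_2 _ hpre
  obtain ⟨h1, h2⟩ := hpre
  unfold Spec_pos_fre_min_same pos_fre_min_same pos_fre_min_same_alt
  obtain ⟨⟨t1, c1⟩, hm1⟩ := pv_minEntry?_isSome pos_1 h1
  obtain ⟨⟨t2, c2⟩, hm2⟩ := pv_minEntry?_isSome pos_2 h2
  rw [pv_first_eq_min pos_1, pv_first_eq_min pos_2, hm1, hm2]
  show (t1 == t2 && ((c1 - 1 : Int) == c2 - 1)) = (t1 == t2 && c1 == c2)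
  have h2 : ((c1 - 1 : Int) == c2 - 1) = (c1 == c2) := by
    by_cases h : c1 = c2 <;> simp [h]
  rw [h2]
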